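-- pv_equiv track=rewrite | github.com/easylearningscores/Triton_AI4Earth | Exp2_Global_ocean_simulation/networks/Fourcastnet.py | _create_axes_perm
-- ===== SOURCE A (Python) =====
-- from typing import List
-- from typing import List, Optional, Tuple
-- from typing import List, Union
--
-- def _create_axes_perm(ndim: int, dims: Tuple[int]) -> Tuple[List[int], List[int]]:
--     """Creates permuted axes indices for RFFT/IRFFT operators."""
--     perm_in = list(range(ndim))
--     perm_out = list(perm_in)
--     # Move indices to the right to make 'dims' as innermost dimensions.
--     for i in range(-1, -(len(dims) + 1), -1):
--         perm_in[dims[i]], perm_in[i] = perm_in[i], perm_in[dims[i]]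
--     # Move indices to the left to restore original shape.
--     for i in range(-len(dims), 0):
--         perm_out[dims[i]], perm_out[i] = perm_out[i], perm_out[dims[i]]
--
--     return perm_in, perm_out
-- ===== SOURCE B (Python) =====
-- def _create_axes_perm(ndim, dims):
--     """Creates permuted axes indices for RFFT/IRFFT operators."""
--     perm_in = list(range(ndim))
--     # Apply the transpositions directly: pair each dim (taken last-to-first)
--     # with a descending target position, resolving negative dims via % ndim.
--     b = ndim - 1
--     for d in reversed(dims):
--         a = d % ndim
--         t = perm_in[a]
--         perm_in[a] = perm_in[b]
--         perm_in[b] = t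
--         b -= 1
--     # perm_out is the inverse permutation of perm_in.
--     perm_out = [0] * ndim
--     for i, v in enumerate(perm_in):
--         perm_out[v] = i
--     return perm_in, perm_out
-- ===== Notes on version B (the rewrite author's own statement) =====
-- stated objective: alternative
-- what changed: B iterates over reversed(dims) with an explicit descending position counter and %-resolved indices (instead of A's swap loop over negative range indices), and builds perm_out in one fill pass as the inverse permutation of perm_in (perm_out[v] = i) instead of A's second reverse-order swap loop; the reverse-order transpositions compose to exactly that inverse.
import Mathlib
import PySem

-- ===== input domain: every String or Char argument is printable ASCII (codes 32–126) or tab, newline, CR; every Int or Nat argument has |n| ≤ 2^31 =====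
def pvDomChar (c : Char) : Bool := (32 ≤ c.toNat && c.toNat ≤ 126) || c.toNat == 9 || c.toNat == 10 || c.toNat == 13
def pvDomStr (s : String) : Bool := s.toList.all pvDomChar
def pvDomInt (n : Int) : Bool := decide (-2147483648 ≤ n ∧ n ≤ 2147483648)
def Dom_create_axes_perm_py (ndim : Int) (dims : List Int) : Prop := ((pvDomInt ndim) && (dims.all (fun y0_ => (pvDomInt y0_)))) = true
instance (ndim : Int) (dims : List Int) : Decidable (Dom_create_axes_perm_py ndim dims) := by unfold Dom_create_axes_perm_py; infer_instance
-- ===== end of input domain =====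

-- B walks reversed(dims) with an explicit descending position counter and %-resolved
-- indices (no negative-range swap loop) and fills perm_out as the inverse permutation
-- of perm_in; objective: alternative decomposition, same cost.

-- ===== PORT A =====
-- Python "xs[a], xs[b] = xs[b], xs[a]": RHS pair read first, then targets assigned left to right
def pySwap2 (xs : List Int) (a b : Int) : List Int :=
  PySem.List.pySetD (PySem.List.pySetD xs a (PySem.List.pyGetD xs b 0)) b (PySem.List.pyGetD xs a 0)

def create_axes_perm_py (ndim : Int) (dims : List Int) : List Int × List Int :=
  let perm_in0 : List Int := PySem.List.pyRange 0 ndim 1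
  let perm_out0 : List Int := perm_in0
  let perm_in := (PySem.List.pyRange (-1) (-((dims.length : Int) + 1)) (-1)).foldl
      (fun p i => pySwap2 p (PySem.List.pyGetD dims i 0) i) perm_in0
  let perm_out := (PySem.List.pyRange (-(dims.length : Int)) 0 1).foldl
      (fun p i => pySwap2 p (PySem.List.pyGetD dims i 0) i) perm_out0
  (perm_in, perm_out)

-- ===== PORT B =====
-- "t = xs[a]; xs[a] = xs[b]; xs[b] = t" of Source B, step for step
def swapIdx (xs : List Int) (a b : Int) : List Int :=
  let t := PySem.List.pyGetD xs a 0
  let xs1 := PySem.List.pySetD xs a (PySem.List.pyGetD xs b 0)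
  PySem.List.pySetD xs1 b t

def create_axes_perm_py_alt (ndim : Int) (dims : List Int) : List Int × List Int :=
  let pin := (dims.reverse.foldl
      (fun (s : List Int × Int) d => (swapIdx s.1 (PySem.Int.mod d ndim) s.2, s.2 - 1))
      (PySem.List.pyRange 0 ndim 1, ndim - 1)).1
  let pout := (PySem.List.enumerate pin).foldl
      (fun out iv => PySem.List.pySetD out iv.2 iv.1) (PySem.List.pyRepeat [(0 : Int)] ndim)
  (pin, pout)

-- ===== PRECONDITION & SPEC =====
-- Pre_ excludes exactly the inputs on which A raises IndexError: an entry of dims outside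
-- [-ndim, ndim) or more dims than ndim axes (the negative loop index then falls off perm_in).
def Pre_create_axes_perm_py (ndim : Int) (dims : List Int) : Prop :=
  (∀ d ∈ dims, -ndim ≤ d ∧ d < ndim) ∧ ((dims.length : Int) ≤ ndim ∨ dims = [])
instance (ndim : Int) (dims : List Int) : Decidable (Pre_create_axes_perm_py ndim dims) := by
  unfold Pre_create_axes_perm_py; infer_instance

def pvWitness_create_axes_perm_py : Int × List Int := (3, [1, -1])

def Spec_create_axes_perm_py (ndim : Int) (dims : List Int) (out : List Int × List Int) : Prop := out = create_axes_perm_py_alt ndim dims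
instance (ndim : Int) (dims : List Int) (out : List Int × List Int) : Decidable (Spec_create_axes_perm_py ndim dims out) := by unfold Spec_create_axes_perm_py; infer_instance

-- ===== CLAIM (what is proved, stated in full; the proofs are below) =====
def Claim_equal_create_axes_perm_py : Prop := ∀ (ndim : Int) (dims : List Int), Dom_create_axes_perm_py ndim dims → Pre_create_axes_perm_py ndim dims → Spec_create_axes_perm_py ndim dims (create_axes_perm_py ndim dims)

-- ===== LEMMAS AND PROOFS =====

-- Position a Python index i (with -n ≤ i < n) resolves to in a list of length n.
def posOf (n : Nat) (i : Int) : Nat := (if i < 0 then (n : Int) + i else i).toNat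

-- The transposition of positions a and b, as a function.
def swapFun (a b x : Nat) : Nat := if x = a then b else if x = b then a else x

-- Swap the entries at (in-range, Nat) positions q.1 and q.2, mirroring the swaps' write order.
def swapNat (xs : List Int) (q : Nat × Nat) : List Int :=
  (xs.set q.1 (xs.getD q.2 0)).set q.2 (xs.getD q.1 0)

-- The permutation a sequence of transpositions applies to the positions of a list
-- (head of the list = first swap executed).
def sigmaP : List (Nat × Nat) → Nat → Nat
  | [], x => x
  | q :: ps, x => swapFun q.1 q.2 (sigmaP ps x)

-- The pair of resolved positions swapped at loop index i (both loops of A use the same pairs).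
def pairAt (n : Nat) (dims : List Int) (i : Int) : Nat × Nat :=
  (posOf n (PySem.List.pyGetD dims i 0), posOf n i)

-- The resolved position pairs B's perm_in loop swaps, first counter value b.
def pairsB (ndim : Int) : List Int → Int → List (Nat × Nat)
  | [], _ => []
  | d :: t, b => ((PySem.Int.mod d ndim).toNat, b.toNat) :: pairsB ndim t (b - 1)

lemma swapFun_lt {n a b x : Nat} (ha : a < n) (hb : b < n) (hx : x < n) : swapFun a b x < n := by
  unfold swapFun; split_ifs <;> assumption

lemma swapFun_invol (a b x : Nat) : swapFun a b (swapFun a b x) = x := by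
  unfold swapFun; split_ifs <;> omega

lemma sigmaP_lt {n : Nat} {qs : List (Nat × Nat)} (h : ∀ q ∈ qs, q.1 < n ∧ q.2 < n)
    {x : Nat} (hx : x < n) : sigmaP qs x < n := by
  induction qs with
  | nil => exact hx
  | cons q t ih =>
      exact swapFun_lt (h q (List.mem_cons_self ..)).1 (h q (List.mem_cons_self ..)).2
        (ih (fun r hr => h r (List.mem_cons_of_mem _ hr)))

lemma sigmaP_append (ps qs : List (Nat × Nat)) (x : Nat) :
    sigmaP (ps ++ qs) x = sigmaP ps (sigmaP qs x) := by
  induction ps with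
  | nil => rfl
  | cons q t ih => simp [sigmaP, ih]

lemma sigmaP_reverse (qs : List (Nat × Nat)) (x : Nat) :
    sigmaP qs.reverse (sigmaP qs x) = x := by
  induction qs generalizing x with
  | nil => rfl
  | cons q t ih =>
      rw [List.reverse_cons]
      show sigmaP (t.reverse ++ [q]) (swapFun q.1 q.2 (sigmaP t x)) = x
      rw [sigmaP_append]
      show sigmaP t.reverse (swapFun q.1 q.2 (swapFun q.1 q.2 (sigmaP t x))) = x
      rw [swapFun_invol]; exact ih x

lemma sigmaP_reverse' (qs : List (Nat × Nat)) (x : Nat) :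
    sigmaP qs (sigmaP qs.reverse x) = x := by
  have h := sigmaP_reverse qs.reverse x
  rwa [List.reverse_reverse] at h

lemma length_swapNat (xs : List Int) (q : Nat × Nat) : (swapNat xs q).length = xs.length := by
  simp [swapNat]

lemma getD_swapNat {xs : List Int} {q : Nat × Nat} (ha : q.1 < xs.length) (hb : q.2 < xs.length)
    (p : Nat) : (swapNat xs q).getD p 0 = xs.getD (swapFun q.1 q.2 p) 0 := by
  rcases q with ⟨a, b⟩
  unfold swapNat swapFun
  simp only [List.getD_eq_getElem?_getD, List.getElem?_set, List.length_set]
  by_cases hpb : p = b <;> by_cases hpa : p = a <;> simp_all <;> split_ifs <;> simp_all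

lemma foldl_swapNat_length (qs : List (Nat × Nat)) (xs : List Int) :
    (qs.foldl swapNat xs).length = xs.length := by
  induction qs generalizing xs with
  | nil => rfl
  | cons q t ih => simp [List.foldl_cons, ih, length_swapNat]

lemma foldl_swapNat_getD (qs : List (Nat × Nat)) (xs : List Int)
    (h : ∀ q ∈ qs, q.1 < xs.length ∧ q.2 < xs.length) (p : Nat) :
    (qs.foldl swapNat xs).getD p 0 = xs.getD (sigmaP qs p) 0 := by
  induction qs generalizing xs with
  | nil => rfl
  | cons q t ih =>
      have hq := h q (List.mem_cons_self ..)
      rw [List.foldl_cons, ih (swapNat xs q)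
          (fun r hr => by rw [length_swapNat]; exact h r (List.mem_cons_of_mem _ hr))]
      show (swapNat xs q).getD (sigmaP t p) 0 = xs.getD (swapFun q.1 q.2 (sigmaP t p)) 0
      exact getD_swapNat hq.1 hq.2 _

lemma pyGetD_posOf {xs : List Int} {i : Int}
    (h1 : -(xs.length : Int) ≤ i) (h2 : i < xs.length) :
    PySem.List.pyGetD xs i 0 = xs.getD (posOf xs.length i) 0 := by
  unfold posOf
  simp only [PySem.List.pyGetD, PySem.List.pyGet?, PySem.List.pyIdx?]
  split_ifs <;> simp_all [List.getD_eq_getElem?_getD] <;> (first | omega | (congr 2 <;> omega))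

lemma pySetD_posOf {xs : List Int} {i : Int}
    (h1 : -(xs.length : Int) ≤ i) (h2 : i < xs.length) (v : Int) :
    PySem.List.pySetD xs i v = xs.set (posOf xs.length i) v := by
  unfold posOf
  simp only [PySem.List.pySetD, PySem.List.pySet?, PySem.List.pyIdx?]
  split_ifs <;> simp_all <;> (first | omega | (congr 2 <;> omega))

lemma pySwap2_eq {xs : List Int} {n : Nat} (hxs : xs.length = n) {a b : Int}
    (ha1 : -(n : Int) ≤ a) (ha2 : a < n) (hb1 : -(n : Int) ≤ b) (hb2 : b < n) :
    pySwap2 xs a b = swapNat xs (posOf n a, posOf n b) := by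
  subst hxs
  unfold pySwap2 swapNat
  rw [pyGetD_posOf hb1 hb2, pyGetD_posOf ha1 ha2, pySetD_posOf ha1 ha2,
    pySetD_posOf (xs := xs.set (posOf xs.length a) (xs.getD (posOf xs.length b) 0))
      (by simpa using hb1) (by simpa using hb2)]
  simp

-- swapIdx reads and writes the same cells in the same order as the tuple swap.
lemma swapIdx_eq_pySwap2 (xs : List Int) (a b : Int) : swapIdx xs a b = pySwap2 xs a b := rfl

lemma posOf_of_nonneg {n : Nat} {a : Int} (ha : 0 ≤ a) : posOf n a = a.toNat := by
  unfold posOf; rw [if_neg (by omega)]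

-- Both of A's loops, rewritten over resolved Nat position pairs.
lemma bridgeA (dims : List Int) (n : Nat) (l : List Int) :
    ∀ (xs : List Int), xs.length = n →
    (∀ i ∈ l, (-(n : Int) ≤ i ∧ i < n) ∧
      (-(n : Int) ≤ PySem.List.pyGetD dims i 0 ∧ PySem.List.pyGetD dims i 0 < n)) →
    l.foldl (fun p i => pySwap2 p (PySem.List.pyGetD dims i 0) i) xs
      = (l.map (pairAt n dims)).foldl swapNat xs := by
  induction l with
  | nil => intro xs _ _; rfl
  | cons i t ih =>
      intro xs hxs hl
      have hi := hl i (List.mem_cons_self ..)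
      have hs : pySwap2 xs (PySem.List.pyGetD dims i 0) i = swapNat xs (pairAt n dims i) := by
        unfold pairAt
        exact pySwap2_eq hxs hi.2.1 hi.2.2 hi.1.1 hi.1.2
      rw [List.foldl_cons, List.map_cons, List.foldl_cons, hs]
      exact ih _ (by rw [length_swapNat]; exact hxs) (fun j hj => hl j (List.mem_cons_of_mem _ hj))

-- B's perm_in loop, rewritten over resolved Nat position pairs.
lemma bridgeB (ndim : Int) (n : Nat) (l : List Int) :
    ∀ (xs : List Int) (b : Int), xs.length = n →
    (∀ d ∈ l, 0 ≤ PySem.Int.mod d ndim ∧ PySem.Int.mod d ndim < n) →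
    (∀ k : Nat, k < l.length → 0 ≤ b - k ∧ b - k < n) →
    (l.foldl (fun (s : List Int × Int) d => (swapIdx s.1 (PySem.Int.mod d ndim) s.2, s.2 - 1))
        (xs, b)).1
      = (pairsB ndim l b).foldl swapNat xs := by
  induction l with
  | nil => intro xs b _ _ _; rfl
  | cons d t ih =>
      intro xs b hxs hmod hb
      have hd := hmod d (List.mem_cons_self ..)
      have hb0 := hb 0 (by simp)
      simp only [Int.natCast_zero, sub_zero] at hb0
      have hs : swapIdx xs (PySem.Int.mod d ndim) b
          = swapNat xs ((PySem.Int.mod d ndim).toNat, b.toNat) := by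
        rw [swapIdx_eq_pySwap2,
          pySwap2_eq hxs (by omega) hd.2 (by omega) hb0.2,
          posOf_of_nonneg hd.1, posOf_of_nonneg hb0.1]
      rw [List.foldl_cons, pairsB, List.foldl_cons, hs]
      exact ih _ _ (by rw [length_swapNat]; exact hxs)
        (fun e he => hmod e (List.mem_cons_of_mem _ he))
        (fun k hk => by
          have := hb (k + 1) (by simpa using Nat.succ_lt_succ hk)
          push_cast at this ⊢; constructor <;> omega)

lemma length_pairsB (ndim : Int) (l : List Int) (b : Int) :
    (pairsB ndim l b).length = l.length := by
  induction l generalizing b with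
  | nil => rfl
  | cons d t ih => simp [pairsB, ih]

lemma getElem_pairsB (ndim : Int) (l : List Int) (b : Int) (k : Nat) (hk : k < l.length) :
    (pairsB ndim l b)[k]'(by rw [length_pairsB]; exact hk)
      = ((PySem.Int.mod (l[k]'hk) ndim).toNat, (b - k).toNat) := by
  induction l generalizing b k with
  | nil => simp at hk
  | cons d t ih =>
      cases k with
      | zero => simp [pairsB]
      | succ k =>
          have := ih (b - 1) k (by simpa using Nat.lt_of_succ_lt_succ hk)
          simp only [pairsB, List.getElem_cons_succ]
          rw [this]
          congr 2
          push_cast; omega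

lemma length_pyRange_zero (ndim : Int) : (PySem.List.pyRange 0 ndim 1).length = ndim.toNat := by
  rw [PySem.List.length_pyRange_one]; omega

lemma getD_pyRange_zero (ndim : Int) {k : Nat} (hk : k < ndim.toNat) :
    (PySem.List.pyRange 0 ndim 1).getD k 0 = (k : Int) := by
  have hlen : k < (PySem.List.pyRange 0 ndim 1).length := by rw [length_pyRange_zero]; exact hk
  rw [List.getD_eq_getElem _ _ hlen, PySem.List.getElem_pyRange_one]
  simp

-- B's pair list is exactly A's.
lemma pairs_eq (ndim : Int) (dims : List Int) (hpos : 0 < ndim)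
    (hmem : ∀ d ∈ dims, -ndim ≤ d ∧ d < ndim) :
    pairsB ndim dims.reverse (ndim - 1)
      = (PySem.List.pyRange (-1) (-((dims.length : Int) + 1)) (-1)).map
          (pairAt ndim.toNat dims) := by
  have hn : ((ndim.toNat : Nat) : Int) = ndim := by omega
  apply List.ext_getElem
  · rw [length_pairsB, List.length_reverse, List.length_map, PySem.List.pyRange_neg_one]
    simp
  · intro k hk1 hk2
    have hkL : k < dims.length := by
      rw [length_pairsB, List.length_reverse] at hk1; exact hk1
    have hlt : dims.length - 1 - k < dims.length := by omega
    have hidx : (PySem.List.pyRange (-1) (-((dims.length : Int) + 1)) (-1))[k]'(by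
        rw [PySem.List.pyRange_neg_one]; simpa using hkL) = -1 - (k : Int) := by
      simp [PySem.List.pyRange_neg_one]
    rw [getElem_pairsB ndim dims.reverse (ndim - 1) k
        (by rw [List.length_reverse]; exact hkL),
      List.getElem_map, hidx]
    have hrevd : dims.reverse[k]'(by rw [List.length_reverse]; exact hkL)
        = dims.getD (dims.length - 1 - k) 0 := by
      rw [List.getD_eq_getElem _ _ hlt]; exact List.getElem_reverse ..
    rw [hrevd]
    have hdb := hmem (dims.getD (dims.length - 1 - k) 0)
      (by rw [List.getD_eq_getElem _ _ hlt]; exact List.getElem_mem hlt)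
    have hget : PySem.List.pyGetD dims (-1 - (k : Int)) 0
        = dims.getD (dims.length - 1 - k) 0 := by
      rw [pyGetD_posOf (by omega) (by omega)]
      have hpos2 : posOf dims.length (-1 - (k : Int)) = dims.length - 1 - k := by
        unfold posOf; rw [if_pos (by omega)]; omega
      rw [hpos2]
    unfold pairAt
    rw [hget]
    have hmod : PySem.Int.mod (dims.getD (dims.length - 1 - k) 0) ndim
        = if dims.getD (dims.length - 1 - k) 0 < 0
          then dims.getD (dims.length - 1 - k) 0 + ndim
          else dims.getD (dims.length - 1 - k) 0 := by
      rw [PySem.Int.mod_eq_emod_of_pos hpos]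
      split_ifs with hneg
      · rw [← Int.add_emod_right]
        exact Int.emod_eq_of_lt (by omega) (by omega)
      · exact Int.emod_eq_of_lt (by omega) (by omega)
    refine Prod.ext ?_ ?_
    · show (PySem.Int.mod (dims.getD (dims.length - 1 - k) 0) ndim).toNat
        = posOf ndim.toNat (dims.getD (dims.length - 1 - k) 0)
      rw [hmod]; unfold posOf; split_ifs <;> omega
    · show (ndim - 1 - (k : Int)).toNat = posOf ndim.toNat (-1 - (k : Int))
      unfold posOf; rw [if_pos (by omega)]; omega

-- B's perm_in equals A's perm_in.
lemma pin_eq (ndim : Int) (dims : List Int) (hpre : Pre_create_axes_perm_py ndim dims) :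
    (dims.reverse.foldl
        (fun (s : List Int × Int) d => (swapIdx s.1 (PySem.Int.mod d ndim) s.2, s.2 - 1))
        (PySem.List.pyRange 0 ndim 1, ndim - 1)).1
      = (PySem.List.pyRange (-1) (-((dims.length : Int) + 1)) (-1)).foldl
          (fun p i => pySwap2 p (PySem.List.pyGetD dims i 0) i) (PySem.List.pyRange 0 ndim 1) := by
  obtain ⟨hmem, hlen⟩ := hpre
  rcases eq_or_ne dims [] with rfl | hne
  · simp [PySem.List.pyRange_neg_one_eq_nil]
  · obtain ⟨d0, hd0⟩ := List.exists_mem_of_ne_nil dims hne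
    have hpos : 0 < ndim := by have := hmem d0 hd0; omega
    have hL : (dims.length : Int) ≤ ndim := hlen.resolve_right hne
    have hn : ((ndim.toNat : Nat) : Int) = ndim := by omega
    set n := ndim.toNat with hndef
    have hlen0 : (PySem.List.pyRange 0 ndim 1).length = n := length_pyRange_zero ndim
    rw [bridgeB ndim n dims.reverse _ _ hlen0
        (fun d hd => by
          have := hmem d (List.mem_reverse.mp hd)
          exact ⟨PySem.Int.mod_nonneg _ hpos, by have := PySem.Int.mod_lt d hpos; omega⟩)
        (fun k hk => by
          rw [List.length_reverse] at hk
          constructor <;> omega),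
      pairs_eq ndim dims hpos hmem,
      bridgeA dims n _ _ hlen0
        (fun i hi => by
          rw [PySem.List.mem_pyRange_neg_one] at hi
          have hd : PySem.List.pyGetD dims i 0 ∈ dims := by
            apply PySem.List.pyGetD_mem
            simp [PySem.Raise.InRange]; omega
          have := hmem _ hd
          exact ⟨⟨by omega, by omega⟩, by omega, by omega⟩)]

-- The fill loop of B leaves entry p alone when no processed index writes to p.
lemma foldl_fill_len (perm_in : List Int) (l : List Int) (o : List Int) :
    (l.foldl (fun o j => PySem.List.pySetD o (PySem.List.pyGetD perm_in j 0) j) o).length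
      = o.length := by
  induction l generalizing o with
  | nil => rfl
  | cons j t ih => rw [List.foldl_cons, ih]; exact PySem.List.length_pySetD ..

lemma foldl_fill_ne (perm_in : List Int) (p : Nat) (l : List Int) (o : List Int)
    (h : ∀ j ∈ l, 0 ≤ PySem.List.pyGetD perm_in j 0 ∧
      (PySem.List.pyGetD perm_in j 0).toNat ≠ p) :
    (l.foldl (fun o j => PySem.List.pySetD o (PySem.List.pyGetD perm_in j 0) j) o).getD p 0
      = o.getD p 0 := by
  induction l generalizing o with
  | nil => rfl
  | cons j t ih =>
      have hj := h j (List.mem_cons_self ..)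
      rw [List.foldl_cons, ih _ (fun r hr => h r (List.mem_cons_of_mem _ hr)),
        PySem.List.pySetD_of_nonneg _ _ hj.1]
      simp only [List.getD_eq_getElem?_getD]
      rw [List.getElem?_set_ne hj.2]

lemma perm_out_eq (ndim : Int) (dims : List Int)
    (hpre : Pre_create_axes_perm_py ndim dims) :
    (PySem.List.pyRange (-(dims.length : Int)) 0 1).foldl
        (fun p i => pySwap2 p (PySem.List.pyGetD dims i 0) i) (PySem.List.pyRange 0 ndim 1)
      = (PySem.List.enumerate
          ((PySem.List.pyRange (-1) (-((dims.length : Int) + 1)) (-1)).foldl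
            (fun p i => pySwap2 p (PySem.List.pyGetD dims i 0) i)
            (PySem.List.pyRange 0 ndim 1))).foldl
          (fun out iv => PySem.List.pySetD out iv.2 iv.1) (PySem.List.pyRepeat [(0 : Int)] ndim) := by
  obtain ⟨hmem, hlen⟩ := hpre
  set n := ndim.toNat with hn
  set L := (dims.length : Int) with hL
  have hgood : ∀ i : Int, -L ≤ i → i < 0 →
      ((-(n : Int) ≤ i ∧ i < n) ∧
        (-(n : Int) ≤ PySem.List.pyGetD dims i 0 ∧ PySem.List.pyGetD dims i 0 < n)) := by
    intro i h1 h2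
    have hdne : dims ≠ [] := by
      intro h; rw [hL, h] at h1; simp at h1; omega
    have hLle : L ≤ ndim := hlen.resolve_right hdne
    have hd : PySem.List.pyGetD dims i 0 ∈ dims := by
      apply PySem.List.pyGetD_mem
      simp [PySem.Raise.InRange]; omega
    obtain ⟨hd1, hd2⟩ := hmem _ hd
    refine ⟨⟨by omega, by omega⟩, by omega, by omega⟩
  have h1 : ∀ i ∈ PySem.List.pyRange (-1) (-(L + 1)) (-1),
      (-(n : Int) ≤ i ∧ i < n) ∧
        (-(n : Int) ≤ PySem.List.pyGetD dims i 0 ∧ PySem.List.pyGetD dims i 0 < n) := by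
    intro i hi; rw [PySem.List.mem_pyRange_neg_one] at hi
    exact hgood i (by omega) (by omega)
  have h2 : ∀ i ∈ PySem.List.pyRange (-L) 0 1,
      (-(n : Int) ≤ i ∧ i < n) ∧
        (-(n : Int) ≤ PySem.List.pyGetD dims i 0 ∧ PySem.List.pyGetD dims i 0 < n) := by
    intro i hi; rw [PySem.List.mem_pyRange_one] at hi
    exact hgood i (by omega) (by omega)
  have hlen0 : (PySem.List.pyRange 0 ndim 1).length = n := length_pyRange_zero ndim
  rw [bridgeA dims n _ _ hlen0 h2, bridgeA dims n _ _ hlen0 h1]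
  have hrev : (PySem.List.pyRange (-L) 0 1).map (pairAt n dims)
      = ((PySem.List.pyRange (-1) (-(L + 1)) (-1)).map (pairAt n dims)).reverse := by
    rw [PySem.List.pyRange_neg_one_eq_reverse]
    have he : (-(L + 1) + 1 : Int) = -L := by ring
    have he2 : (-1 + 1 : Int) = 0 := by ring
    rw [he, he2, List.map_reverse, List.reverse_reverse]
  rw [hrev]
  set qs := (PySem.List.pyRange (-1) (-(L + 1)) (-1)).map (pairAt n dims) with hqsdef
  have hqs : ∀ q ∈ qs, q.1 < n ∧ q.2 < n := by
    intro q hq; rw [hqsdef, List.mem_map] at hq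
    obtain ⟨i, hi, rfl⟩ := hq
    rw [PySem.List.mem_pyRange_neg_one] at hi
    have hg := hgood i (by omega) (by omega)
    unfold pairAt posOf
    constructor
    · split_ifs <;> omega
    · split_ifs <;> omega
  have hqsl : ∀ q ∈ qs, q.1 < (PySem.List.pyRange 0 ndim 1).length ∧
      q.2 < (PySem.List.pyRange 0 ndim 1).length := by
    rw [hlen0]; exact hqs
  have hqsr : ∀ q ∈ qs.reverse, q.1 < n ∧ q.2 < n :=
    fun q hq => hqs q (List.mem_reverse.mp hq)
  set perm_in := qs.foldl swapNat (PySem.List.pyRange 0 ndim 1) with hpin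
  have hlenin : perm_in.length = n := by rw [hpin, foldl_swapNat_length, hlen0]
  have hval : ∀ k, k < n → perm_in.getD k 0 = ((sigmaP qs k : Nat) : Int) := by
    intro k hk
    rw [hpin, foldl_swapNat_getD qs _ hqsl]
    exact getD_pyRange_zero ndim (sigmaP_lt hqs hk)
  rw [PySem.List.enumerate_eq_map_pyRange perm_in 0, List.foldl_map]
  show List.foldl swapNat (PySem.List.pyRange 0 ndim 1) qs.reverse
      = List.foldl (fun o j => PySem.List.pySetD o (PySem.List.pyGetD perm_in j 0) j)
        (PySem.List.pyRepeat [(0 : Int)] ndim) (PySem.List.pyRange 0 (PySem.List.len perm_in) 1)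
  apply List.ext_getElem
  · rw [foldl_swapNat_length, hlen0, foldl_fill_len, PySem.List.pyRepeat_singleton,
      List.length_replicate]
  · intro k hk1 hk2
    have hkn : k < n := by rwa [foldl_swapNat_length, hlen0] at hk1
    rw [← List.getD_eq_getElem _ 0 hk1, ← List.getD_eq_getElem _ 0 hk2]
    rw [foldl_swapNat_getD qs.reverse _ (by rw [hlen0]; exact hqsr),
      getD_pyRange_zero ndim (sigmaP_lt hqsr hkn)]
    set i0 := sigmaP qs.reverse k with hi0def
    have hi0n : i0 < n := sigmaP_lt hqsr hkn
    have hgi0 : sigmaP qs i0 = k := by rw [hi0def]; exact sigmaP_reverse' qs k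
    have hrange : PySem.List.len perm_in = (perm_in.length : Int) := by
      simp [PySem.List.len_eq]
    have hsplit : PySem.List.pyRange 0 (PySem.List.len perm_in) 1
        = PySem.List.pyRange 0 (i0 : Int) 1
          ++ ((i0 : Int) :: PySem.List.pyRange ((i0 : Int) + 1) (PySem.List.len perm_in) 1) := by
      rw [hrange, hlenin,
        PySem.List.pyRange_one_append 0 (i0 : Int) (n : Int) (by omega) (by exact_mod_cast Nat.cast_le.mpr (le_of_lt hi0n)),
        PySem.List.pyRange_one_cons (a := (i0 : Int)) (b := (n : Int)) (by exact_mod_cast hi0n)]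
    rw [hsplit, List.foldl_append, List.foldl_cons]
    have hsuffix : ∀ j ∈ PySem.List.pyRange ((i0 : Int) + 1) (PySem.List.len perm_in) 1,
        0 ≤ PySem.List.pyGetD perm_in j 0 ∧ (PySem.List.pyGetD perm_in j 0).toNat ≠ k := by
      intro j hj
      rw [hrange, hlenin, PySem.List.mem_pyRange_one] at hj
      have hjn : j.toNat < n := by omega
      have hjpos : (0 : Int) ≤ j := by omega
      have hget : PySem.List.pyGetD perm_in j 0 = ((sigmaP qs j.toNat : Nat) : Int) := by
        rw [PySem.List.pyGetD_eq_getElem perm_in 0 hjpos (by omega),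
          ← List.getD_eq_getElem _ 0 (by omega)]
        exact hval j.toNat hjn
      rw [hget]
      refine ⟨by positivity, ?_⟩
      intro hc
      have : sigmaP qs j.toNat = k := by omega
      have hji : j.toNat = i0 := by
        rw [hi0def, ← this]; exact (sigmaP_reverse qs j.toNat).symm
      omega
    rw [foldl_fill_ne perm_in k _ _ hsuffix]
    have hpi0 : PySem.List.pyGetD perm_in ((i0 : Nat) : Int) 0 = ((k : Nat) : Int) := by
      rw [PySem.List.pyGetD_natCast, hval i0 hi0n, hgi0]
    rw [hpi0, PySem.List.pySetD_natCast]
    have hmidlen : ((PySem.List.pyRange 0 (i0 : Int) 1).foldl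
        (fun o j => PySem.List.pySetD o (PySem.List.pyGetD perm_in j 0) j)
        (PySem.List.pyRepeat [(0 : Int)] ndim)).length = n := by
      rw [foldl_fill_len, PySem.List.pyRepeat_singleton, List.length_replicate]
    have hklt : k < ((PySem.List.pyRange 0 (i0 : Int) 1).foldl
        (fun o j => PySem.List.pySetD o (PySem.List.pyGetD perm_in j 0) j)
        (PySem.List.pyRepeat [(0 : Int)] ndim)).length := by rw [hmidlen]; exact hkn
    have hklt2 : k < (((PySem.List.pyRange 0 (i0 : Int) 1).foldl
        (fun o j => PySem.List.pySetD o (PySem.List.pyGetD perm_in j 0) j)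
        (PySem.List.pyRepeat [(0 : Int)] ndim)).set k ((i0 : Nat) : Int)).length := by
      rw [List.length_set]; exact hklt
    rw [List.getD_eq_getElem _ 0 hklt2, List.getElem_set_self]

-- ===== VERDICT (by name: the statement is the Claim_ definition above) =====
theorem create_axes_perm_py_spec : Claim_equal_create_axes_perm_py := by
  intro ndim dims _hdom hpre
  unfold Spec_create_axes_perm_py create_axes_perm_py create_axes_perm_py_alt
  refine congrArg₂ Prod.mk ?_ ?_
  · exact (pin_eq ndim dims hpre).symm
  · rw [perm_out_eq ndim dims hpre, ← pin_eq ndim dims hpre]
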